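-- pv_equiv track=rewrite | github.com/Joxy97/QUBO-6b | src/draw_decay_chain.py | descendants_from_roots
-- ===== SOURCE A (Python) =====
-- from collections import defaultdict, deque
--
-- def descendants_from_roots(roots, daughters):
--     keep = set()
--     dq = deque(roots)
--     while dq:
--         u = dq.popleft()
--         if u in keep:
--             continue
--         keep.add(u)
--         for v in daughters.get(u, []):
--             if v not in keep:
--                 dq.append(v)
--     return keep
-- ===== SOURCE B (Python) =====
-- def descendants_from_roots(roots, daughters):
--     keep = set()
--     frontier = set(roots)
--     while frontier:
--         keep |= frontier
--         nxt = set()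
--         for u in frontier:
--             for v in daughters.get(u, []):
--                 if v not in keep:
--                     nxt.add(v)
--         frontier = nxt
--     return keep
-- ===== Notes on version B (the rewrite author's own statement) =====
-- stated objective: alternative
-- what changed: Replaces A's single FIFO worklist (deque with skip-if-already-kept on pop) by a level-synchronous frontier BFS: keep and frontier are sets, each round unions the whole frontier into keep and rebuilds the frontier from the level's not-yet-kept daughters.
import Mathlib
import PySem

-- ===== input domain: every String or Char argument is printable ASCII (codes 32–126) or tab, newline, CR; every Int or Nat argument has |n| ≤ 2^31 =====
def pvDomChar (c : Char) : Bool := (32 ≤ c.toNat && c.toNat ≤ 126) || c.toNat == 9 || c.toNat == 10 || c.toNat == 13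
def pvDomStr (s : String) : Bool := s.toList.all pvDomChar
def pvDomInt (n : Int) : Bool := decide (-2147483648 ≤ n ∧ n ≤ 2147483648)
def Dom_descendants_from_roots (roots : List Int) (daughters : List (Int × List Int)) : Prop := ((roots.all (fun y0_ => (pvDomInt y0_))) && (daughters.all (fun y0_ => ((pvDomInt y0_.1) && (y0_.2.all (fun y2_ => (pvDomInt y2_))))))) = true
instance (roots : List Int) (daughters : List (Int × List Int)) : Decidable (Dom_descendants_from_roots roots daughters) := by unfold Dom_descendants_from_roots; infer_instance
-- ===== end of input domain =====

-- B replaces A's FIFO worklist (deque with dedup-on-pop) by a level-synchronous frontier BFS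
-- (union each whole frontier into keep, rebuild the frontier from the level's unseen daughters);
-- objective: alternative decomposition — same reachable set, same cost.

-- ===== PORT A =====
-- shared helper: Python's  daughters.get(u, [])  (both A and B call it)
def pvGetDaughters (daughters : List (Int × List Int)) (u : Int) : List Int :=
  PySem.Dict.getD (PySem.Dict.ofList daughters) u []
def pvFlat (daughters : List (Int × List Int)) : List Int := (daughters.map Prod.snd).flatten
theorem pvItems_foldl_subset (pairs : List (Int × List Int)) (d0 : PySem.Dict Int (List Int))
    (p : Int × List Int) (h : p ∈ (pairs.foldl (fun d q => d.insert q.1 q.2) d0).items) :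
    p ∈ d0.items ∨ p ∈ pairs := by
  induction pairs generalizing d0 with
  | nil => exact Or.inl h
  | cons q qs ih =>
    simp only [List.foldl_cons] at h
    rcases ih _ h with h' | h'
    · rcases (PySem.Dict.mem_items_insert d0 q.1 q.2 p).mp h' with h'' | h''
      · exact Or.inr (by simp [h''])
      · exact Or.inl h''.1
    · exact Or.inr (List.mem_cons_of_mem _ h')
theorem pvGetDaughters_cases (d : List (Int × List Int)) (u : Int) :
    pvGetDaughters d u = [] ∨ pvGetDaughters d u ∈ d.map Prod.snd := by
  unfold pvGetDaughters
  rw [PySem.Dict.getD_eq_get?_getD]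
  cases hg : PySem.Dict.get? (PySem.Dict.ofList d) u with
  | none => simp
  | some l =>
    simp only [Option.getD_some]
    have hm : (u, l) ∈ (PySem.Dict.ofList d).items := PySem.Dict.mem_items_of_get?_eq_some _ hg
    rcases pvItems_foldl_subset d _ _ hm with h' | h'
    · simp [PySem.Dict.empty] at h'
    · exact Or.inr (List.mem_map.mpr ⟨(u, l), h', rfl⟩)
theorem pvGetDaughters_subset {d : List (Int × List Int)} {u v : Int}
    (h : v ∈ pvGetDaughters d u) : v ∈ pvFlat d := by
  rcases pvGetDaughters_cases d u with h' | h'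
  · rw [h'] at h; simp at h
  · exact List.mem_flatten.mpr ⟨_, h', h⟩
theorem pvGetDaughters_length_le (d : List (Int × List Int)) (u : Int) :
    (pvGetDaughters d u).length ≤ (pvFlat d).length := by
  rcases pvGetDaughters_cases d u with h' | h'
  · simp [h']
  · exact (List.sublist_flatten_of_mem h').length_le
def pvMeasA (d : List (Int × List Int)) (keep : PySem.Set Int) (dq : List Int) : Nat :=
  dq.length + ((pvFlat d).length + 1) *
    ((dq ++ pvFlat d).filter (fun x => !PySem.Set.contains keep x)).toFinset.card

def pvDescA (d : List (Int × List Int)) (keep : PySem.Set Int) (dq : List Int) : PySem.Set Int :=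
  match dq with
  | [] => keep
  | u :: rest =>
    if PySem.Set.contains keep u then pvDescA d keep rest
    else pvDescA d (PySem.Set.add keep u)
      (rest ++ (pvGetDaughters d u).filter (fun v => !PySem.Set.contains (PySem.Set.add keep u) v))
termination_by pvMeasA d keep dq
decreasing_by
  · unfold pvMeasA
    have hsub : ((rest ++ pvFlat d).filter (fun x => !PySem.Set.contains keep x)).toFinset ⊆
        (((u :: rest) ++ pvFlat d).filter (fun x => !PySem.Set.contains keep x)).toFinset := by
      intro x hx
      simp only [List.mem_toFinset, List.mem_filter, List.mem_append] at hx ⊢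
      tauto
    have hc := Finset.card_le_card hsub
    have := Nat.mul_le_mul_left ((pvFlat d).length + 1) hc
    simp only [List.length_cons]
    omega
  · rename_i h
    unfold pvMeasA
    set C := (pvFlat d).length + 1
    set app := (pvGetDaughters d u).filter (fun v => !PySem.Set.contains (PySem.Set.add keep u) v)
    have hnk : u ∉ keep := fun hm => h ((PySem.Set.contains_iff keep u).mpr hm)
    have hu : u ∈ (((u :: rest) ++ pvFlat d).filter (fun x => !PySem.Set.contains keep x)).toFinset := by
      simp only [List.mem_toFinset, List.mem_filter, List.mem_append, List.mem_cons]
      constructor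
      · simp
      · simpa using hnk
    rw [List.append_assoc]
    have hsub : ((rest ++ (app ++ pvFlat d)).filter (fun x => !PySem.Set.contains (PySem.Set.add keep u) x)).toFinset ⊆
        ((((u :: rest) ++ pvFlat d).filter (fun x => !PySem.Set.contains keep x)).toFinset).erase u := by
      intro x hx
      simp only [List.mem_toFinset, List.mem_filter, List.mem_append] at hx
      obtain ⟨hmem, hnc⟩ := hx
      have hna : x ∉ PySem.Set.add keep u := by
        intro hxm
        rw [← PySem.Set.contains_iff] at hxm
        rw [hxm] at hnc
        simp at hnc
      have hxu : x ≠ u := fun he => hna ((PySem.Set.mem_add keep u x).mpr (Or.inr he))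
      have hxk : x ∉ keep := fun hm => hna ((PySem.Set.mem_add keep u x).mpr (Or.inl hm))
      have hmem' : x ∈ (u :: rest) ++ pvFlat d := by
        simp only [List.mem_append, List.mem_cons]
        rcases hmem with hr | ha | hf
        · exact Or.inl (Or.inr hr)
        · exact Or.inr (pvGetDaughters_subset (List.mem_of_mem_filter ha))
        · exact Or.inr hf
      rw [Finset.mem_erase]
      refine ⟨hxu, ?_⟩
      simp only [List.mem_toFinset, List.mem_filter]
      refine ⟨hmem', ?_⟩
      simpa using hxk
    set X := (((u :: rest) ++ pvFlat d).filter (fun x => !PySem.Set.contains keep x)).toFinset.card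
    set Y := ((rest ++ (app ++ pvFlat d)).filter (fun x => !PySem.Set.contains (PySem.Set.add keep u) x)).toFinset.card
    have hcard1 : 1 ≤ X := Finset.card_pos.mpr ⟨u, hu⟩
    have hcle : Y ≤ X - 1 := by
      have := Finset.card_le_card hsub
      rwa [Finset.card_erase_of_mem hu] at this
    have happlen : app.length ≤ (pvFlat d).length := by
      calc app.length ≤ (pvGetDaughters d u).length := List.length_filter_le _ _
        _ ≤ (pvFlat d).length := pvGetDaughters_length_le d u
    have h1 : C * Y ≤ C * (X - 1) := Nat.mul_le_mul_left C hcle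
    have h2 : C * (X - 1) + C = C * X := by
      rw [← Nat.mul_succ]
      congr 1
      omega
    simp only [List.length_append, List.length_cons]
    calc rest.length + app.length + C * Y
        ≤ rest.length + app.length + C * (X - 1) := Nat.add_le_add_left h1 _
      _ < rest.length + 1 + C * X := by omega

-- ===== PORT B =====
-- one level of B: nxt = { v | u in frontier, v in daughters.get(u, []), v not in keep' }
def pvLevel (d : List (Int × List Int)) (keep' : PySem.Set Int) (frontier : PySem.Set Int) : PySem.Set Int :=
  frontier.foldl
    (fun s u => (pvGetDaughters d u).foldl
      (fun s v => if PySem.Set.contains keep' v then s else PySem.Set.add s v) s)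
    PySem.Set.empty

theorem pvLevel_eq (d : List (Int × List Int)) (k f : PySem.Set Int) :
    pvLevel d k f =
      PySem.Set.ofList ((f.flatMap (pvGetDaughters d)).filter (fun v => !PySem.Set.contains k v)) := by
  unfold pvLevel
  rw [PySem.Set.ofList_eq_foldl, List.foldl_filter, List.foldl_flatMap]
  congr 1
  funext s v
  by_cases h : PySem.Set.contains k v <;> simp

def pvMeasB (d : List (Int × List Int)) (keep frontier : PySem.Set Int) : Nat :=
  2 * ((frontier ++ pvFlat d).filter (fun x => !PySem.Set.contains keep x)).toFinset.card +
    (if frontier.any (fun x => PySem.Set.contains keep x) then 1 else 0)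

def pvDescB (d : List (Int × List Int)) (keep frontier : PySem.Set Int) : PySem.Set Int :=
  if frontier.isEmpty then keep
  else
    let keep' := PySem.Set.union keep frontier
    pvDescB d keep' (pvLevel d keep' frontier)
termination_by pvMeasB d keep frontier
decreasing_by
  rename_i hne
  rw [pvLevel_eq]
  unfold pvMeasB
  have hKk : ∀ x, x ∈ keep → x ∈ PySem.Set.union keep frontier := by
    intro x hx; exact (PySem.Set.mem_update keep frontier x).mpr (Or.inl hx)
  have hKf : ∀ x, x ∈ frontier → x ∈ PySem.Set.union keep frontier := by
    intro x hx; exact (PySem.Set.mem_update keep frontier x).mpr (Or.inr hx)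
  have hmemN : ∀ x, x ∈ PySem.Set.ofList
      ((frontier.flatMap (pvGetDaughters d)).filter (fun v => !PySem.Set.contains (PySem.Set.union keep frontier) v)) →
      x ∈ pvFlat d ∧ ¬ x ∈ PySem.Set.union keep frontier := by
    intro x hx
    rw [PySem.Set.mem_ofList] at hx
    rw [List.mem_filter] at hx
    obtain ⟨hm, hc⟩ := hx
    obtain ⟨u', hu', hv'⟩ := List.mem_flatMap.mp hm
    refine ⟨pvGetDaughters_subset hv', ?_⟩
    intro hmem
    rw [← PySem.Set.contains_iff] at hmem
    rw [hmem] at hc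
    simp at hc
  by_cases hall : ∀ x ∈ frontier, x ∈ keep
  · -- whole frontier already kept: card cannot grow, flag drops 1 → 0
    have hKeq : PySem.Set.union keep frontier = keep := by
      rw [PySem.Set.union, PySem.Set.update_eq_append_filter]
      have : List.filter (fun y => !PySem.Set.contains keep y) (PySem.Set.ofList frontier) = [] := by
        rw [List.filter_eq_nil_iff]
        intro a ha
        simpa using hall a ((PySem.Set.mem_ofList frontier a).mp ha)
      rw [this, List.append_nil]
    rw [hKeq] at hmemN ⊢
    have hflag1 : (frontier.any (fun x => PySem.Set.contains keep x)) = true := by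
      obtain ⟨w, hw⟩ := List.exists_mem_of_ne_nil frontier (by simpa [List.isEmpty_iff] using hne)
      exact List.any_eq_true.mpr ⟨w, hw, (PySem.Set.contains_iff keep w).mpr (hall w hw)⟩
    have hflag0 : ((PySem.Set.ofList ((frontier.flatMap (pvGetDaughters d)).filter (fun v => !PySem.Set.contains keep v))).any (fun x => PySem.Set.contains keep x)) = false := by
      rw [List.any_eq_false]
      intro x hx
      have := (hmemN x hx).2
      rw [← PySem.Set.contains_iff] at this
      simpa using this
    have hsub : ((PySem.Set.ofList ((frontier.flatMap (pvGetDaughters d)).filter (fun v => !PySem.Set.contains keep v)) ++ pvFlat d).filter (fun x => !PySem.Set.contains keep x)).toFinset ⊆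
        ((frontier ++ pvFlat d).filter (fun x => !PySem.Set.contains keep x)).toFinset := by
      intro x hx
      simp only [List.mem_toFinset, List.mem_filter, List.mem_append] at hx ⊢
      obtain ⟨hm, hc⟩ := hx
      refine ⟨Or.inr ?_, hc⟩
      rcases hm with hm | hm
      · exact (hmemN x hm).1
      · exact hm
    have hc := Finset.card_le_card hsub
    rw [hflag1, hflag0]
    simp only [if_true, Bool.false_eq_true, if_false]
    omega
  · -- some u in the frontier is new: its card strictly decreases
    push Not at hall
    obtain ⟨u, hu, hunk⟩ := hall
    have huS : u ∈ ((frontier ++ pvFlat d).filter (fun x => !PySem.Set.contains keep x)).toFinset := by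
      simp only [List.mem_toFinset, List.mem_filter, List.mem_append]
      refine ⟨Or.inl hu, ?_⟩
      rw [← PySem.Set.contains_iff] at hunk
      simpa using hunk
    have hsub : ((PySem.Set.ofList ((frontier.flatMap (pvGetDaughters d)).filter (fun v => !PySem.Set.contains (PySem.Set.union keep frontier) v)) ++ pvFlat d).filter (fun x => !PySem.Set.contains (PySem.Set.union keep frontier) x)).toFinset ⊆
        (((frontier ++ pvFlat d).filter (fun x => !PySem.Set.contains keep x)).toFinset).erase u := by
      intro x hx
      simp only [List.mem_toFinset, List.mem_filter, List.mem_append] at hx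
      obtain ⟨hm, hc⟩ := hx
      have hnK : ¬ x ∈ PySem.Set.union keep frontier := by
        intro hmem
        rw [← PySem.Set.contains_iff] at hmem
        rw [hmem] at hc
        simp at hc
      have hxu : x ≠ u := fun he => hnK (he ▸ hKf u hu)
      have hxk : ¬ x ∈ keep := fun hm' => hnK (hKk x hm')
      rw [Finset.mem_erase]
      refine ⟨hxu, ?_⟩
      simp only [List.mem_toFinset, List.mem_filter, List.mem_append]
      refine ⟨Or.inr ?_, by rw [← PySem.Set.contains_iff] at hxk; simpa using hxk⟩
      rcases hm with hm | hm
      · exact (hmemN x hm).1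
      · exact hm
    have hcle := Finset.card_le_card hsub
    rw [Finset.card_erase_of_mem huS] at hcle
    have hcard1 : 1 ≤ ((frontier ++ pvFlat d).filter (fun x => !PySem.Set.contains keep x)).toFinset.card :=
      Finset.card_pos.mpr ⟨u, huS⟩
    have hflag : (if (PySem.Set.ofList ((frontier.flatMap (pvGetDaughters d)).filter (fun v => !PySem.Set.contains (PySem.Set.union keep frontier) v))).any (fun x => PySem.Set.contains (PySem.Set.union keep frontier) x) then 1 else 0) ≤ 1 := by
      split <;> omega
    omega

def descendants_from_roots (roots : List Int) (daughters : List (Int × List Int)) : List Int :=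
  pvDescA daughters PySem.Set.empty roots
def descendants_from_roots_alt (roots : List Int) (daughters : List (Int × List Int)) : List Int :=
  pvDescB daughters PySem.Set.empty (PySem.Set.ofList roots)


-- ===== PRECONDITION & SPEC =====
def Spec_descendants_from_roots (roots : List Int) (daughters : List (Int × List Int)) (out : List Int) : Prop := out = descendants_from_roots_alt roots daughters
instance (roots : List Int) (daughters : List (Int × List Int)) (out : List Int) : Decidable (Spec_descendants_from_roots roots daughters out) := by unfold Spec_descendants_from_roots; infer_instance

-- ===== CLAIM (what is proved, stated in full; the proofs are below) =====
def Claim_equal_descendants_from_roots : Prop := ∀ (roots : List Int) (daughters : List (Int × List Int)), Dom_descendants_from_roots roots daughters → Spec_descendants_from_roots roots daughters (descendants_from_roots roots daughters)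

-- ===== LEMMAS AND PROOFS =====
theorem descA_nil (d : List (Int × List Int)) (k : PySem.Set Int) : pvDescA d k [] = k := by
  unfold pvDescA
  rfl

theorem descA_cons_mem (d : List (Int × List Int)) (k : PySem.Set Int) (u : Int) (q : List Int)
    (h : PySem.Set.contains k u = true) : pvDescA d k (u :: q) = pvDescA d k q := by
  rw [pvDescA, if_pos h]

theorem descA_cons_new (d : List (Int × List Int)) (k : PySem.Set Int) (u : Int) (q : List Int)
    (h : PySem.Set.contains k u = false) :
    pvDescA d k (u :: q) =
      pvDescA d (PySem.Set.add k u)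
        (q ++ (pvGetDaughters d u).filter (fun v => !PySem.Set.contains (PySem.Set.add k u) v)) := by
  rw [pvDescA, if_neg (by rw [h]; exact Bool.false_ne_true)]

-- A's processing of one level: final keep and the concatenation of everything appended
def pvLf (d : List (Int × List Int)) (k : PySem.Set Int) : List Int → PySem.Set Int × List Int
  | [] => (k, [])
  | u :: q =>
    if PySem.Set.contains k u then pvLf d k q
    else
      let r := pvLf d (PySem.Set.add k u) q
      (r.1, (pvGetDaughters d u).filter (fun v => !PySem.Set.contains (PySem.Set.add k u) v) ++ r.2)

theorem pvLf_mem (d : List (Int × List Int)) (k : PySem.Set Int) (u : Int) (q : List Int)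
    (h : PySem.Set.contains k u = true) : pvLf d k (u :: q) = pvLf d k q := by
  simp only [pvLf, h, if_true]

theorem pvLf_new (d : List (Int × List Int)) (k : PySem.Set Int) (u : Int) (q : List Int)
    (h : PySem.Set.contains k u = false) :
    pvLf d k (u :: q) = ((pvLf d (PySem.Set.add k u) q).1,
      (pvGetDaughters d u).filter (fun v => !PySem.Set.contains (PySem.Set.add k u) v) ++
        (pvLf d (PySem.Set.add k u) q).2) := by
  simp only [pvLf, h, Bool.false_eq_true, if_false]

theorem pvLevelA (d : List (Int × List Int)) (q : List Int) :
    ∀ (k : PySem.Set Int) (acc : List Int),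
      pvDescA d k (q ++ acc) = pvDescA d (pvLf d k q).1 (acc ++ (pvLf d k q).2) := by
  induction q with
  | nil => intro k acc; simp [pvLf]
  | cons u q ih =>
    intro k acc
    cases hc : PySem.Set.contains k u with
    | true =>
      rw [List.cons_append, descA_cons_mem d k u _ hc, ih k acc, pvLf_mem d k u q hc]
    | false =>
      rw [List.cons_append, descA_cons_new d k u _ hc, List.append_assoc, ih (PySem.Set.add k u) _,
        pvLf_new d k u q hc]
      rw [List.append_assoc]

-- removing already-kept elements and duplicates from the queue does not change the run
def pvNorm (k : PySem.Set Int) : List Int → List Int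
  | [] => []
  | a :: q => if PySem.Set.contains k a then pvNorm k q else a :: pvNorm (PySem.Set.add k a) q

theorem pvNorm_mem (k : PySem.Set Int) (a : Int) (q : List Int)
    (h : PySem.Set.contains k a = true) : pvNorm k (a :: q) = pvNorm k q := by
  simp only [pvNorm, h, if_true]

theorem pvNorm_new (k : PySem.Set Int) (a : Int) (q : List Int)
    (h : PySem.Set.contains k a = false) :
    pvNorm k (a :: q) = a :: pvNorm (PySem.Set.add k a) q := by
  simp only [pvNorm, h, Bool.false_eq_true, if_false]

theorem pvNormA (d : List (Int × List Int)) (q : List Int) :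
    ∀ (k : PySem.Set Int) (tail : List Int),
      pvDescA d k (q ++ tail) = pvDescA d k (pvNorm k q ++ tail) := by
  induction q with
  | nil => intro k tail; simp [pvNorm]
  | cons a q ih =>
    intro k tail
    cases hc : PySem.Set.contains k a with
    | true =>
      rw [List.cons_append, descA_cons_mem d k a _ hc, ih k tail, pvNorm_mem k a q hc]
    | false =>
      rw [pvNorm_new k a q hc, List.cons_append, descA_cons_new d k a _ hc, List.append_assoc,
        ih (PySem.Set.add k a) _, List.cons_append, descA_cons_new d k a _ hc, List.append_assoc]

theorem pvOfList_filter (p : Int → Bool) (l : List Int) :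
    PySem.Set.ofList (l.filter p) = (PySem.Set.ofList l).filter p := by
  induction l using List.reverseRecOn with
  | nil => simp
  | append_singleton l x ih =>
    rw [List.filter_append]
    cases hp : p x with
    | true =>
      rw [show List.filter p [x] = [x] from by simp [hp]]
      rw [PySem.Set.ofList_append_singleton, PySem.Set.ofList_append_singleton, ih,
        PySem.Set.add_eq_ite, PySem.Set.add_eq_ite]
      by_cases hm : x ∈ PySem.Set.ofList l
      · rw [if_pos hm, if_pos (by rw [List.mem_filter]; exact ⟨hm, hp⟩)]
      · rw [if_neg hm, if_neg (by rw [List.mem_filter]; exact fun h => hm h.1), List.filter_append]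
        simp [hp]
    | false =>
      rw [show List.filter p [x] = [] from by simp [hp], List.append_nil,
        PySem.Set.ofList_append_singleton, ih, PySem.Set.add_eq_ite]
      by_cases hm : x ∈ PySem.Set.ofList l
      · rw [if_pos hm]
      · rw [if_neg hm, List.filter_append]
        simp [hp]

theorem pvNorm_eq (q : List Int) :
    ∀ (k : PySem.Set Int),
      pvNorm k q = PySem.Set.ofList (q.filter (fun x => !PySem.Set.contains k x)) := by
  induction q with
  | nil => intro k; simp [pvNorm]
  | cons a q ih =>
    intro k
    cases hc : PySem.Set.contains k a with
    | true =>
      have hm : a ∈ k := (PySem.Set.contains_iff k a).mp hc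
      rw [pvNorm_mem k a q hc, ih k,
        show List.filter (fun x => !PySem.Set.contains k x) (a :: q) =
          List.filter (fun x => !PySem.Set.contains k x) q from by simp [hm]]
    | false =>
      have hnm : a ∉ k := by simp only [← PySem.Set.contains_iff, hc]; exact Bool.false_ne_true
      rw [pvNorm_new k a q hc, ih (PySem.Set.add k a),
        show List.filter (fun x => !PySem.Set.contains k x) (a :: q) =
          a :: List.filter (fun x => !PySem.Set.contains k x) q from by simp [hnm],
        PySem.Set.ofList_cons]
      congr 1
      have hpred : (fun x => !PySem.Set.contains (PySem.Set.add k a) x) =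
          (fun x => (x != a) && !PySem.Set.contains k x) := by
        funext x
        by_cases hxk : x ∈ k <;> by_cases hxa : x = a <;>
          simp [PySem.Set.mem_add, hxk, hxa]
      rw [hpred, ← List.filter_filter, pvOfList_filter]
      rfl

theorem pvLf1 (d : List (Int × List Int)) (f : List Int) :
    ∀ (k : PySem.Set Int), (∀ x ∈ f, ¬ x ∈ k) → f.Nodup →
      (pvLf d k f).1 = PySem.Set.update k f := by
  induction f with
  | nil => intro k _ _; simp [pvLf, PySem.Set.update_nil]
  | cons u f ih =>
    intro k hdis hnd
    have hc : PySem.Set.contains k u = false :=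
      Bool.eq_false_iff.mpr (fun h => hdis u (List.mem_cons_self) ((PySem.Set.contains_iff k u).mp h))
    rw [pvLf_new d k u f hc, PySem.Set.update_cons]
    exact ih (PySem.Set.add k u)
      (fun x hx hm => by
        rcases (PySem.Set.mem_add k u x).mp hm with h' | h'
        · exact hdis x (List.mem_cons_of_mem u hx) h'
        · exact (List.nodup_cons.mp hnd).1 (h' ▸ hx))
      (List.nodup_cons.mp hnd).2

theorem pvLf2 (d : List (Int × List Int)) (f : List Int) :
    ∀ (k : PySem.Set Int), (∀ x ∈ f, ¬ x ∈ k) → f.Nodup →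
      ((pvLf d k f).2).filter (fun v => !PySem.Set.contains (PySem.Set.update k f) v) =
        (f.flatMap (pvGetDaughters d)).filter (fun v => !PySem.Set.contains (PySem.Set.update k f) v) := by
  induction f with
  | nil => intro k _ _; simp [pvLf]
  | cons u f ih =>
    intro k hdis hnd
    have hc : PySem.Set.contains k u = false :=
      Bool.eq_false_iff.mpr (fun h => hdis u (List.mem_cons_self) ((PySem.Set.contains_iff k u).mp h))
    rw [pvLf_new d k u f hc, List.flatMap_cons]
    simp only [List.filter_append]
    rw [PySem.Set.update_cons]
    congr 1
    · -- head piece: the stronger filter absorbs the weaker one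
      rw [List.filter_filter]
      apply List.filter_congr
      intro a _
      cases hKa : PySem.Set.contains (PySem.Set.update (PySem.Set.add k u) f) a with
      | true => simp
      | false =>
        have hna : ¬ a ∈ PySem.Set.update (PySem.Set.add k u) f := by
          simp only [← PySem.Set.contains_iff, hKa]
          exact Bool.false_ne_true
        have h2 : PySem.Set.contains (PySem.Set.add k u) a = false :=
          Bool.eq_false_iff.mpr (fun h => hna
            ((PySem.Set.mem_update _ f a).mpr (Or.inl ((PySem.Set.contains_iff _ a).mp h))))
        rw [h2]
        simp
    · exact ih (PySem.Set.add k u)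
        (fun x hx hm => by
          rcases (PySem.Set.mem_add k u x).mp hm with h' | h'
          · exact hdis x (List.mem_cons_of_mem u hx) h'
          · exact (List.nodup_cons.mp hnd).1 (h' ▸ hx))
        (List.nodup_cons.mp hnd).2

theorem pvMain (d : List (Int × List Int)) (k f : PySem.Set Int)
    (hdis : ∀ x ∈ f, ¬ x ∈ k) (hnd : f.Nodup) : pvDescA d k f = pvDescB d k f := by
  induction k, f using pvDescB.induct d with
  | case1 k f hemp =>
    have hf : f = [] := List.isEmpty_iff.mp hemp
    subst hf
    rw [descA_nil, pvDescB, if_pos (show (List.isEmpty ([] : List Int)) = true from rfl)]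
  | case2 k f hemp keep' ih =>
    -- notation
    have hKeq : keep' = PySem.Set.update k f := rfl
    -- A does one level
    have h1 : pvDescA d k f = pvDescA d (pvLf d k f).1 (pvLf d k f).2 := by
      have := pvLevelA d f k []
      rwa [List.append_nil, List.nil_append] at this
    rw [h1, pvLf1 d f k hdis hnd]
    -- normalize the appended queue
    have h2 := pvNormA d (pvLf d k f).2 (PySem.Set.update k f) []
    rw [List.append_nil, List.append_nil] at h2
    rw [h2, pvNorm_eq, pvLf2 d f k hdis hnd]
    -- the normalized queue is exactly B's next frontier
    have h3 : PySem.Set.ofList ((f.flatMap (pvGetDaughters d)).filter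
        (fun v => !PySem.Set.contains (PySem.Set.update k f) v)) = pvLevel d keep' f := by
      rw [pvLevel_eq, hKeq]
    rw [h3]
    -- induction hypothesis on the next level
    have hnxt : ∀ x ∈ pvLevel d keep' f, ¬ x ∈ keep' := by
      intro x hx
      rw [pvLevel_eq] at hx
      rw [PySem.Set.mem_ofList, List.mem_filter] at hx
      intro hm
      rw [← PySem.Set.contains_iff] at hm
      rw [hm] at hx
      simp at hx
    have hnd' : (pvLevel d keep' f).Nodup := by
      rw [pvLevel_eq]; exact PySem.Set.nodup_ofList _
    rw [← hKeq, ih hnxt hnd']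
    -- fold B's step back
    conv_rhs => rw [pvDescB, if_neg hemp]


-- ===== VERDICT (by name: the statement is the Claim_ definition above) =====
theorem descendants_from_roots_spec : Claim_equal_descendants_from_roots := by
  intro roots d _
  unfold Spec_descendants_from_roots descendants_from_roots descendants_from_roots_alt
  have h0 := pvNormA d roots PySem.Set.empty []
  rw [List.append_nil, List.append_nil] at h0
  have hfilt : roots.filter (fun x => !PySem.Set.contains PySem.Set.empty x) = roots :=
    List.filter_eq_self.mpr (fun a _ => by simp [PySem.Set.contains, PySem.Set.empty])
  rw [h0, pvNorm_eq, hfilt]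
  exact pvMain d PySem.Set.empty (PySem.Set.ofList roots)
    (fun x _ hm => by simp [PySem.Set.empty] at hm) (PySem.Set.nodup_ofList roots)
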